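-- pv_equiv track=rewrite | github.com/evaportelance/vqa-function-word-learning | dataset and probe creation/new-balanced-clevr-dataset-creation/get_clevr_frequencies.py | get_token_counts
-- ===== SOURCE A (Python) =====
-- def get_token_counts(data):
--     word_set = {"and", "or", "more", "fewer", "behind", "front", "same"}
--     token_count_dict = {"and": 0, "or": 0, "more": 0, "fewer": 0, "behind": 0, "in front": 0, "same": 0}
--     prev_word = ""
--     for word in data:
--         if word in word_set:
--             if word == "front":
--                 if prev_word == "in":
--                     token_count_dict["in front"] += 1
--             else:
--                 token_count_dict[word] += 1
--         prev_word = word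
--     return token_count_dict
-- ===== SOURCE B (Python) =====
-- from collections import Counter
--
--
-- def get_token_counts(data):
--     tokens = list(data)
--     counts = Counter(tokens)
--     in_front = sum(a == "in" and b == "front" for a, b in zip(tokens, tokens[1:]))
--     return {"and": counts["and"], "or": counts["or"], "more": counts["more"],
--             "fewer": counts["fewer"], "behind": counts["behind"],
--             "in front": in_front, "same": counts["same"]}
-- ===== Notes on version B (the rewrite author's own statement) =====
-- stated objective: simpler
-- what changed: Replaces A's single stateful loop that threads a prev-word variable and updates a pre-initialised dict in place by a Counter over the tokens (one lookup per target word) plus a separate zip-based scan that counts the in/front bigrams, assembling the result dict in one literal.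
import Mathlib
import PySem

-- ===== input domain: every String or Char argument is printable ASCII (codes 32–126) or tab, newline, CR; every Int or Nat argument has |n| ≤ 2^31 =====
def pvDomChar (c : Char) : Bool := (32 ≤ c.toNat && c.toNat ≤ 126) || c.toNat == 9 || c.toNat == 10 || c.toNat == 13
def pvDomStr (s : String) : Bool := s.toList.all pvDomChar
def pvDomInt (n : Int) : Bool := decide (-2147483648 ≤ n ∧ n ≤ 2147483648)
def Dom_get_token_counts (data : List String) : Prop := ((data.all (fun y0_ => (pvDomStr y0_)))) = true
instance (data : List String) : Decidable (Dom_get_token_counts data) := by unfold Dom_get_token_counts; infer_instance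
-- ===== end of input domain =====

-- B replaces A's stateful dict-updating loop by a Counter lookup per key plus a separate bigram scan for "in front" (objective: simpler/idiomatic; same O(n) cost).


-- ===== PORT A =====
-- the loop body of A: state = (token_count_dict, prev_word)
def gtcStep (s : PySem.Dict String Int × String) (word : String) : PySem.Dict String Int × String :=
  let d := s.1
  let prev := s.2
  let d' :=
    if ["and", "or", "more", "fewer", "behind", "front", "same"].contains word then  -- word in word_set (set literal)
      if word == "front" then
        if prev == "in" then d.modify "in front" 0 (· + 1) else d
      else
        d.modify word 0 (· + 1)                                                     -- token_count_dict[word] += 1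
    else d
  (d', word)

def get_token_counts (data : List String) : List (String × Int) :=
  -- token_count_dict: dict literal with distinct keys, in source order
  let init : PySem.Dict String Int :=
    PySem.Dict.mk [("and", 0), ("or", 0), ("more", 0), ("fewer", 0), ("behind", 0), ("in front", 0), ("same", 0)]
  ((data.foldl gtcStep (init, "")).1).items

-- ===== PORT B =====
def get_token_counts_alt (data : List String) : List (String × Int) :=
  let tokens := data
  let counts := PySem.Dict.counter tokens                -- collections.Counter(tokens); counts[w] = getD w 0
  -- sum(a == "in" and b == "front" for a, b in zip(tokens, tokens[1:])); tokens[1:] = tokens.tail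
  let in_front : Int := ((tokens.zip tokens.tail).countP (fun p => p.1 == "in" && p.2 == "front") : Int)
  [("and", counts.getD "and" 0), ("or", counts.getD "or" 0), ("more", counts.getD "more" 0),
   ("fewer", counts.getD "fewer" 0), ("behind", counts.getD "behind" 0),
   ("in front", in_front), ("same", counts.getD "same" 0)]

-- ===== PRECONDITION & SPEC =====
def Spec_get_token_counts (data : List String) (out : List (String × Int)) : Prop := out = get_token_counts_alt data
instance (data : List String) (out : List (String × Int)) : Decidable (Spec_get_token_counts data out) := by unfold Spec_get_token_counts; infer_instance

-- ===== CLAIM (what is proved, stated in full; the proofs are below) =====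
def Claim_equal_get_token_counts : Prop := ∀ (data : List String), Dom_get_token_counts data → Spec_get_token_counts data (get_token_counts data)

-- ===== LEMMAS AND PROOFS =====

/-- number of adjacent ("in","front") bigrams in `p :: l`. -/
def bigIF (p : String) : List String → Nat
  | [] => 0
  | x :: xs => (if p == "in" && x == "front" then 1 else 0) + bigIF x xs

lemma bigIF_eq_countP (xs : List String) : ∀ (x : String),
    bigIF x xs = ((x :: xs).zip xs).countP (fun p => p.1 == "in" && p.2 == "front") := by
  induction xs with
  | nil => intro x; simp [bigIF]
  | cons y ys ih =>
    intro x
    simp only [bigIF, List.zip_cons_cons, List.countP_cons, ih y]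
    split <;> simp_all <;> omega

/-- abbreviation for A's dict shape (proof-side only). -/
def gtcD (ca co cm cf cb ci cs : Int) : PySem.Dict String Int :=
  PySem.Dict.mk [("and", ca), ("or", co), ("more", cm), ("fewer", cf), ("behind", cb), ("in front", ci), ("same", cs)]

lemma step_and (ca co cm cf cb ci cs : Int) (p : String) :
    gtcStep (gtcD ca co cm cf cb ci cs, p) "and" = (gtcD (ca + 1) co cm cf cb ci cs, "and") := by
  simp [gtcStep, gtcD, PySem.Dict.modify, PySem.Dict.get?, PySem.Dict.getD, PySem.Dict.insert, PySem.Dict.contains]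

lemma step_or (ca co cm cf cb ci cs : Int) (p : String) :
    gtcStep (gtcD ca co cm cf cb ci cs, p) "or" = (gtcD ca (co + 1) cm cf cb ci cs, "or") := by
  simp [gtcStep, gtcD, PySem.Dict.modify, PySem.Dict.get?, PySem.Dict.getD, PySem.Dict.insert, PySem.Dict.contains]

lemma step_more (ca co cm cf cb ci cs : Int) (p : String) :
    gtcStep (gtcD ca co cm cf cb ci cs, p) "more" = (gtcD ca co (cm + 1) cf cb ci cs, "more") := by
  simp [gtcStep, gtcD, PySem.Dict.modify, PySem.Dict.get?, PySem.Dict.getD, PySem.Dict.insert, PySem.Dict.contains]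

lemma step_fewer (ca co cm cf cb ci cs : Int) (p : String) :
    gtcStep (gtcD ca co cm cf cb ci cs, p) "fewer" = (gtcD ca co cm (cf + 1) cb ci cs, "fewer") := by
  simp [gtcStep, gtcD, PySem.Dict.modify, PySem.Dict.get?, PySem.Dict.getD, PySem.Dict.insert, PySem.Dict.contains]

lemma step_behind (ca co cm cf cb ci cs : Int) (p : String) :
    gtcStep (gtcD ca co cm cf cb ci cs, p) "behind" = (gtcD ca co cm cf (cb + 1) ci cs, "behind") := by
  simp [gtcStep, gtcD, PySem.Dict.modify, PySem.Dict.get?, PySem.Dict.getD, PySem.Dict.insert, PySem.Dict.contains]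

lemma step_same (ca co cm cf cb ci cs : Int) (p : String) :
    gtcStep (gtcD ca co cm cf cb ci cs, p) "same" = (gtcD ca co cm cf cb ci (cs + 1), "same") := by
  simp [gtcStep, gtcD, PySem.Dict.modify, PySem.Dict.get?, PySem.Dict.getD, PySem.Dict.insert, PySem.Dict.contains]

lemma step_front (ca co cm cf cb ci cs : Int) (p : String) :
    gtcStep (gtcD ca co cm cf cb ci cs, p) "front"
      = (gtcD ca co cm cf cb (if p = "in" then ci + 1 else ci) cs, "front") := by
  by_cases hp : p = "in" <;>
    simp [gtcStep, gtcD, hp, PySem.Dict.modify, PySem.Dict.get?, PySem.Dict.getD, PySem.Dict.insert, PySem.Dict.contains]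

lemma step_other (d : PySem.Dict String Int) (p w : String)
    (h : ¬ (w = "and" ∨ w = "or" ∨ w = "more" ∨ w = "fewer" ∨ w = "behind" ∨ w = "front" ∨ w = "same")) :
    gtcStep (d, p) w = (d, w) := by
  have hc : (["and", "or", "more", "fewer", "behind", "front", "same"] : List String).contains w = false := by
    simp only [List.contains_eq_mem, decide_eq_false_iff_not, List.mem_cons, List.not_mem_nil, or_false]
    exact h
  simp only [gtcStep, hc, Bool.false_eq_true, if_false]

lemma gtc_loop (rest : List String) : ∀ (ca co cm cf cb ci cs : Int) (p : String),
    (rest.foldl gtcStep (gtcD ca co cm cf cb ci cs, p)).1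
    = gtcD (ca + rest.count "and") (co + rest.count "or") (cm + rest.count "more")
        (cf + rest.count "fewer") (cb + rest.count "behind") (ci + bigIF p rest)
        (cs + rest.count "same") := by
  induction rest with
  | nil => intro ca co cm cf cb ci cs p; simp [bigIF]
  | cons w ws ih =>
    intro ca co cm cf cb ci cs p
    by_cases hcase : w = "and" ∨ w = "or" ∨ w = "more" ∨ w = "fewer" ∨ w = "behind" ∨ w = "front" ∨ w = "same"
    · rcases hcase with h | h | h | h | h | h | h <;> subst h <;>
        simp only [List.foldl_cons, step_and, step_or, step_more, step_fewer, step_behind,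
          step_front, step_same, ih]
      case pos.inr.inr.inr.inr.inr.inl =>
        by_cases hp : p = "in" <;> simp [hp, gtcD, bigIF, List.count_cons] <;> omega
      all_goals simp [gtcD, bigIF, List.count_cons] <;> omega
    · have hf : (w == "front") = false := by
        simp only [beq_eq_false_iff_ne]; intro hw; exact hcase (by tauto)
      simp only [not_or] at hcase
      obtain ⟨h1, h2, h3, h4, h5, h6, h7⟩ := hcase
      simp only [List.foldl_cons, step_other _ _ _ (by tauto), ih, bigIF, List.count_cons, hf,
        Bool.and_false, if_false]
      simp [gtcD, Ne.symm h1, Ne.symm h2, Ne.symm h3, Ne.symm h4, Ne.symm h5, Ne.symm h7]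
      exact ⟨h1, h2, h3, h4, h5, h7⟩

lemma bigIF_zip (data : List String) :
    bigIF "" data = (data.zip data.tail).countP (fun p => p.1 == "in" && p.2 == "front") := by
  cases data with
  | nil => rfl
  | cons x xs => simp [bigIF, bigIF_eq_countP xs x]

-- ===== VERDICT (by name: the statement is the Claim_ definition above) =====
theorem get_token_counts_spec : Claim_equal_get_token_counts := by
  intro data _
  show get_token_counts data = get_token_counts_alt data
  show ((data.foldl gtcStep (gtcD 0 0 0 0 0 0 0, "")).1).items
    = [("and", ((PySem.Dict.counter data).getD "and" 0 : Int)),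
       ("or", (PySem.Dict.counter data).getD "or" 0),
       ("more", (PySem.Dict.counter data).getD "more" 0),
       ("fewer", (PySem.Dict.counter data).getD "fewer" 0),
       ("behind", (PySem.Dict.counter data).getD "behind" 0),
       ("in front", ((data.zip data.tail).countP (fun p => p.1 == "in" && p.2 == "front") : Int)),
       ("same", (PySem.Dict.counter data).getD "same" 0)]
  rw [gtc_loop data 0 0 0 0 0 0 0 ""]
  simp [gtcD, PySem.Dict.getD_counter, bigIF_zip]
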